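-- pv_equiv track=rewrite | github.com/konstantin-brashkin/codewars | 6 kyu/anagram_difference.py | anagram_difference
-- ===== SOURCE A (Python) =====
-- def anagram_difference(w1, w2):
--     unique_symbols = list(set(w1) & set(w2))
--     similar_symbols = []
--     for i in unique_symbols:
--         array_ui = [w1.count(i), w2.count(i)]
--         similar_symbols += [i] * min(array_ui)
--
--     split_w1 = list(w1)
--     split_w2 = list(w2)
--
--     for i in similar_symbols:
--         split_w1.remove(i)
--         split_w2.remove(i)
--
--     return len(split_w1) + len(split_w2)
-- ===== SOURCE B (Python) =====
-- def anagram_difference(w1, w2):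
--     total = 0
--     for ch in set(w1 + w2):
--         total += abs(w1.count(ch) - w2.count(ch))
--     return total
-- ===== Notes on version B (the rewrite author's own statement) =====
-- stated objective: faster
-- what changed: Replaced A's build-the-common-multiset-then-repeatedly-list.remove approach (each remove is a linear scan, giving quadratic work) by a single sum of absolute count differences over the distinct characters of both strings.
import Mathlib
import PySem

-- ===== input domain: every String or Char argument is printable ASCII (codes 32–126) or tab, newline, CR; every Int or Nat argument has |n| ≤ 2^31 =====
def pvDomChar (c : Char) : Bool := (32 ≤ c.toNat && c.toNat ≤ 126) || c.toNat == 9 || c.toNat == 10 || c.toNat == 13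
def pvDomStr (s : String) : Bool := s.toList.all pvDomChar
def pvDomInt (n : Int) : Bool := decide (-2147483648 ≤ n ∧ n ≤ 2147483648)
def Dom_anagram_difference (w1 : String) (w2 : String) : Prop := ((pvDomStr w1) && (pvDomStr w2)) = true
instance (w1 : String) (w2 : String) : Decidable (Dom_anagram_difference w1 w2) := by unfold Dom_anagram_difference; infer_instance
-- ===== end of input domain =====

-- B replaces A's common-multiset construction with repeated list.remove by one
-- sum of absolute count differences over the distinct characters of both strings.

-- ===== PORT A =====
-- The Python iterates over sets only to accumulate per-character counts and the
-- final lengths, which do not depend on the sets' iteration order.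
-- 'split_w1.remove(i)' / 'split_w2.remove(i)' never raise (each removed char is
-- present with enough multiplicity), so the '.getD s' branch of the port is
-- unreachable and the port is exact.
def anagram_difference (w1 : String) (w2 : String) : Int :=
  let split_w1 := w1.toList
  let split_w2 := w2.toList
  let unique_symbols := PySem.Set.inter (PySem.Set.ofList split_w1) (PySem.Set.ofList split_w2)
  let similar_symbols :=
    unique_symbols.foldl
      (fun acc i => acc ++ List.replicate (min (split_w1.count i) (split_w2.count i)) i) []
  let r1 := similar_symbols.foldl (fun s i => ((PySem.List.remove? s i).getD s)) split_w1
  let r2 := similar_symbols.foldl (fun s i => ((PySem.List.remove? s i).getD s)) split_w2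
  ((r1.length : Int) + (r2.length : Int))

-- ===== PORT B =====
def anagram_difference_alt (w1 : String) (w2 : String) : Int :=
  let l1 := w1.toList
  let l2 := w2.toList
  (PySem.Set.ofList (l1 ++ l2)).foldl
    (fun total ch => total + |((l1.count ch : Int) - (l2.count ch : Int))|) 0

-- ===== PRECONDITION & SPEC =====
def Spec_anagram_difference (w1 : String) (w2 : String) (out : Int) : Prop := out = anagram_difference_alt w1 w2
instance (w1 : String) (w2 : String) (out : Int) : Decidable (Spec_anagram_difference w1 w2 out) := by unfold Spec_anagram_difference; infer_instance

-- ===== CLAIM (what is proved, stated in full; the proofs are below) =====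
def Claim_equal_anagram_difference : Prop := ∀ (w1 : String) (w2 : String), Dom_anagram_difference w1 w2 → Spec_anagram_difference w1 w2 (anagram_difference w1 w2)

-- ===== LEMMAS AND PROOFS =====

-- count of x in the concatenation of replicate blocks over a Nodup index list
lemma count_flatMap_replicate (u : List Char) (f : Char → Nat) (hu : u.Nodup) (x : Char) :
    (u.flatMap (fun i => List.replicate (f i) i)).count x = if x ∈ u then f x else 0 := by
  induction u with
  | nil => simp
  | cons a t ih =>
      simp only [List.nodup_cons] at hu
      simp only [List.flatMap_cons, List.count_append, ih hu.2, List.count_replicate,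
        List.mem_cons]
      by_cases hxa : x = a
      · subst hxa
        simp [hu.1]
      · simp [hxa, Ne.symm hxa]

lemma length_flatMap_replicate (u : List Char) (f : Char → Nat) :
    (u.flatMap (fun i => List.replicate (f i) i)).length = (u.map f).sum := by
  simp [List.length_flatMap]

-- the remove loop: if ms is a sub-multiset of l, every removal succeeds and
-- the final length is l.length - ms.length
lemma fold_remove_length (ms : List Char) : ∀ (l : List Char),
    (∀ c, ms.count c ≤ l.count c) →
    (ms.foldl (fun s i => ((PySem.List.remove? s i).getD s)) l).length = l.length - ms.length := by
  induction ms with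
  | nil => intro l _; simp
  | cons a t ih =>
      intro l h
      have hal : a ∈ l := by
        have := h a
        simp [List.count_cons_self] at this
        exact List.count_pos_iff.mp (by omega)
      have hrem : PySem.List.remove? l a = some (l.erase a) :=
        PySem.List.remove?_eq_some_erase l a hal
      have hsub : ∀ c, t.count c ≤ (l.erase a).count c := by
        intro c
        have hc := h c
        by_cases hca : c = a
        · subst hca
          rw [List.count_erase_self]
          simp only [List.count_cons_self] at hc
          omega
        · rw [List.count_erase_of_ne hca]
          rwa [List.count_cons_of_ne (Ne.symm hca)] at hc
      simp only [List.foldl_cons, hrem, Option.getD_some]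
      rw [ih (l.erase a) hsub, List.length_erase_of_mem hal]
      simp only [List.length_cons]
      omega

-- sub-multiset gives length ≤
lemma length_le_of_count_le (ms l : List Char) (h : ∀ c, ms.count c ≤ l.count c) :
    ms.length ≤ l.length :=
  List.Subperm.length_le (List.subperm_ext_iff.mpr (fun a _ => h a))

-- a 0/1 indicator sum over a list is a count
lemma sum_ite_eq_count (u : List Char) (a : Char) :
    (u.map (fun x => if x = a then 1 else 0)).sum = u.count a := by
  induction u with
  | nil => simp
  | cons b t ih =>
      by_cases hba : b = a
      · subst hba; simp [List.count_cons_self, ih]; omega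
      · simp [hba, List.count_cons_of_ne hba, ih]

-- summing counts of l over any nodup list containing all of l's members gives l.length
lemma sum_counts_eq_length (l : List Char) : ∀ (u : List Char), u.Nodup →
    (∀ x ∈ l, x ∈ u) → (u.map (fun x => l.count x)).sum = l.length := by
  induction l with
  | nil => intro u _ _; simp
  | cons a t ih =>
      intro u hu hm
      have ha : a ∈ u := hm a (by simp)
      have hsplit : (u.map (fun x => (a :: t).count x)).sum
           = (u.map (fun x => t.count x + (if x = a then 1 else 0))).sum := by
        apply congrArg
        apply List.map_congr_left
        intro x _
        by_cases hxa : x = a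
        · subst hxa; simp [List.count_cons_self]
        · simp [List.count_cons_of_ne (Ne.symm hxa), hxa]
      rw [hsplit, List.sum_map_add, ih u hu (fun x hx => hm x (by simp [hx])),
        sum_ite_eq_count, List.count_eq_one_of_mem hu ha]
      simp

-- dropping zero terms from a sum over a list
lemma sum_map_eq_sum_filter (f : Char → Nat) : ∀ (u : List Char),
    (u.map f).sum = ((u.filter (fun x => f x ≠ 0)).map f).sum := by
  intro u
  induction u with
  | nil => simp
  | cons a t ih =>
      by_cases hfa : f a = 0
      · simp [hfa, ih]
      · simp [hfa, ih]

-- sums over two nodup lists agree when f vanishes off their common members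
lemma sum_eq_of_support (u v : List Char) (f : Char → Nat) (hu : u.Nodup) (hv : v.Nodup)
    (h : ∀ x, f x ≠ 0 → (x ∈ u ↔ x ∈ v)) : (u.map f).sum = (v.map f).sum := by
  rw [sum_map_eq_sum_filter f u, sum_map_eq_sum_filter f v]
  have hperm : (u.filter (fun x => f x ≠ 0)).Perm (v.filter (fun x => f x ≠ 0)) := by
    rw [List.perm_ext_iff_of_nodup (hu.filter _) (hv.filter _)]
    intro x
    simp only [List.mem_filter, decide_not, Bool.not_eq_eq_eq_not, Bool.not_true,
      decide_eq_false_iff_not]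
    constructor
    · rintro ⟨hxu, hfx⟩; exact ⟨(h x hfx).mp hxu, hfx⟩
    · rintro ⟨hxv, hfx⟩; exact ⟨(h x hfx).mpr hxv, hfx⟩
  exact (hperm.map f).sum_eq

-- |c1 - c2| over Int, written as a Nat
lemma abs_sub_count (a b : Nat) : |((a : Int) - (b : Int))| = ((a + b - 2 * min a b : Nat) : Int) := by
  rcases Nat.le_total a b with hab | hab
  · rw [Nat.min_eq_left hab, abs_of_nonpos (by omega)]
    omega
  · rw [Nat.min_eq_right hab, abs_of_nonneg (by omega)]
    omega

-- ===== VERDICT (by name: the statement is the Claim_ definition above) =====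
theorem anagram_difference_spec : Claim_equal_anagram_difference := by
  intro w1 w2 _
  unfold Spec_anagram_difference anagram_difference anagram_difference_alt
  simp only [PySem.List.foldl_append_eq_flatMap, List.nil_append, PySem.List.foldl_add, zero_add]
  set l1 := w1.toList with hl1
  set l2 := w2.toList with hl2
  set m : Char → Nat := fun i => min (l1.count i) (l2.count i) with hm
  set u : List Char := PySem.Set.inter (PySem.Set.ofList l1) (PySem.Set.ofList l2) with hu
  set U : List Char := PySem.Set.ofList (l1 ++ l2) with hU
  have hu_nodup : u.Nodup := PySem.Set.nodup_inter _ _ (PySem.Set.nodup_ofList l1)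
  have hU_nodup : U.Nodup := PySem.Set.nodup_ofList _
  have hmemU : ∀ x, x ∈ U ↔ x ∈ l1 ∨ x ∈ l2 := by
    intro x; rw [hU, PySem.Set.mem_ofList, List.mem_append]
  have hmemu : ∀ x, x ∈ u ↔ x ∈ l1 ∧ x ∈ l2 := by
    intro x; rw [hu, PySem.Set.mem_inter, PySem.Set.mem_ofList, PySem.Set.mem_ofList]
  set sim : List Char := u.flatMap (fun i => List.replicate (m i) i) with hsim
  -- sim is a sub-multiset of each of l1, l2
  have hcount : ∀ x, sim.count x = if x ∈ u then m x else 0 := by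
    intro x; exact count_flatMap_replicate u m hu_nodup x
  have hsub1 : ∀ c, sim.count c ≤ l1.count c := by
    intro c; rw [hcount c]; split
    · exact Nat.min_le_left _ _
    · exact Nat.zero_le _
  have hsub2 : ∀ c, sim.count c ≤ l2.count c := by
    intro c; rw [hcount c]; split
    · exact Nat.min_le_right _ _
    · exact Nat.zero_le _
  rw [fold_remove_length sim l1 hsub1, fold_remove_length sim l2 hsub2]
  have hS : sim.length = (u.map m).sum := length_flatMap_replicate u m
  -- Σ over U of min-counts equals Σ over u (min vanishes off u)
  have hminU : (U.map m).sum = (u.map m).sum := by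
    apply sum_eq_of_support U u m hU_nodup hu_nodup
    intro x hfx
    rw [hmemU x, hmemu x, hm] at *
    have h1 : 0 < l1.count x := by by_contra hc; simp [Nat.le_zero.mp (Nat.not_lt.mp hc)] at hfx
    have h2 : 0 < l2.count x := by by_contra hc; simp [Nat.le_zero.mp (Nat.not_lt.mp hc)] at hfx
    have hx1 := List.count_pos_iff.mp h1
    have hx2 := List.count_pos_iff.mp h2
    simp [hx1, hx2]
  -- Σ over U of each word's counts is its length
  have hc1 : (U.map (fun x => l1.count x)).sum = l1.length :=
    sum_counts_eq_length l1 U hU_nodup (fun x hx => (hmemU x).mpr (Or.inl hx))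
  have hc2 : (U.map (fun x => l2.count x)).sum = l2.length :=
    sum_counts_eq_length l2 U hU_nodup (fun x hx => (hmemU x).mpr (Or.inr hx))
  -- rewrite B's summand into Nat form
  have hB : (U.map (fun ch => |((l1.count ch : Int) - (l2.count ch : Int))|)).sum
      = ((U.map (fun ch => l1.count ch + l2.count ch - 2 * m ch)).sum : Int) := by
    rw [Nat.cast_list_sum, List.map_map]
    apply congrArg
    apply List.map_congr_left
    intro x _
    exact abs_sub_count (l1.count x) (l2.count x)
  rw [hB]
  -- Nat bookkeeping: Σ h + 2 Σ min = Σ c1 + Σ c2, then omega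
  have hkey : (U.map (fun ch => l1.count ch + l2.count ch - 2 * m ch)).sum
        + 2 * (U.map m).sum = l1.length + l2.length := by
    have : (U.map (fun ch => (l1.count ch + l2.count ch - 2 * m ch) + 2 * m ch)).sum
        = (U.map (fun ch => l1.count ch + l2.count ch)).sum := by
      apply congrArg; apply List.map_congr_left
      intro x _
      have h1 : m x ≤ l1.count x := Nat.min_le_left _ _
      have h2 : m x ≤ l2.count x := Nat.min_le_right _ _
      omega
    rw [List.sum_map_add, List.sum_map_add] at this
    have h2m : (U.map (fun ch => 2 * m ch)).sum = 2 * (U.map m).sum := by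
      induction U with
      | nil => simp
      | cons a t ih => simp [ih]; ring
    rw [h2m] at this
    omega
  have hS1 : sim.length ≤ l1.length := length_le_of_count_le sim l1 hsub1
  have hS2 : sim.length ≤ l2.length := length_le_of_count_le sim l2 hsub2
  omega
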